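-- pv_equiv track=rewrite | github.com/beBijayeeni/Programming-in-Python | calculate_min_cable.py | calculate_min_cable
-- ===== SOURCE A (Python) =====
-- import math
--
-- def calculate_min_cable(states, positions):
--     """
--     Calculates the minimum total length of cable to connect all OFF systems
--     to the nearest ON system.
--
--     Args:
--         states (list[int]): A list representing the state of each system.
--                               1 for ON, 0 for OFF.
--         positions (list[int]): A list representing the position of each system.
--
--     Returns:
--         int: The minimum total cable length required.
--     """
--     n = len(states)
--     if n == 0 or 1 not in states:
--         # No systems or no ON systems to connect to
--         return 0
--
--     # This list will store the distance to the nearest ON system for each system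
--     min_distances = [math.inf] * n
--
--     # --- Pass 1: Left to Right ---
--     # Find the distance to the nearest ON system on the left
--     last_on_pos = -math.inf
--     for i in range(n):
--         if states[i] == 1:
--             last_on_pos = positions[i]
--
--         # Distance from the current system to the last seen ON system on the left
--         if last_on_pos != -math.inf:
--             min_distances[i] = positions[i] - last_on_pos
--
--     # --- Pass 2: Right to Left ---
--     # Find the distance to the nearest ON system on the right and update the minimum
--     last_on_pos = math.inf
--     total_cable_length = 0
--     for i in range(n - 1, -1, -1):
--         if states[i] == 1:
--             last_on_pos = positions[i]
--
--         # Distance from the current system to the last seen ON system on the right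
--         if last_on_pos != math.inf:
--             # The actual minimum distance is the smaller of the distances
--             # to the left ON system (calculated in pass 1) and the right ON system
--             min_distances[i] = min(min_distances[i], last_on_pos - positions[i])
--
--         # If the system is OFF, add its calculated minimum distance to the total
--         if states[i] == 0:
--             # Only add to total if a connection is possible (not infinity)
--             if min_distances[i] != math.inf:
--                 total_cable_length += min_distances[i]
--
--     return total_cable_length
-- ===== SOURCE B (Python) =====
-- def calculate_min_cable(states, positions):
--     # One forward pass: buffer OFF positions of the current segment and settle
--     # them when the next ON system (or the end of the list) is reached.
--     total = 0
--     last_on = None          # position of the most recent ON system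
--     pending = []            # positions of OFF systems seen since the last ON
--     for s, p in zip(states, positions):
--         if s == 1:
--             for x in pending:
--                 if last_on is None:
--                     total += p - x
--                 else:
--                     total += min(x - last_on, p - x)
--             pending = []
--             last_on = p
--         elif s == 0:
--             pending.append(p)
--     if last_on is not None:
--         for x in pending:
--             total += x - last_on
--     return total
-- ===== Notes on version B (the rewrite author's own statement) =====
-- stated objective: alternative
-- what changed: Replaces A's two index-sweeps with an auxiliary min_distances array by a single forward pass that buffers the OFF positions of the current segment and settles each buffered system (min of signed left/right distance) as soon as the next ON system, or the end of the list, is reached.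
import Mathlib
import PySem

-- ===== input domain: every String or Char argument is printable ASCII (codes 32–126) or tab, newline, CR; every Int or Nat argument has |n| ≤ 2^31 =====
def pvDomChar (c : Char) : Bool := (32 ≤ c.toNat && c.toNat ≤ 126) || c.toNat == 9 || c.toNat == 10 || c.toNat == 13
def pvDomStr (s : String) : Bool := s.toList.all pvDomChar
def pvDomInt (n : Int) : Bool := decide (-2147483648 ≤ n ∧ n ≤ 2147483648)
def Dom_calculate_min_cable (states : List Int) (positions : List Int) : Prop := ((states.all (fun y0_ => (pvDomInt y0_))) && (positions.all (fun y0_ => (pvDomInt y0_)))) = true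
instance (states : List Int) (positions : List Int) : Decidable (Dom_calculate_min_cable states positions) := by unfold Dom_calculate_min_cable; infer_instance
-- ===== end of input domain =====

-- B replaces A's two index-sweeps (with a min_distances array) by a single forward pass
-- buffering each segment's OFF positions; same return value, alternative decomposition.

-- ===== PORT A =====
-- loop body of A's pass 1 (left to right); math.inf / -math.inf are modelled by `none`;
-- states[i] / positions[i] are ported as l[i]?.getD _ (in range whenever Pre_ holds)
def aStep1 (states positions : List Int) (st : Option Int × List (Option Int)) (i : Nat) :
    Option Int × List (Option Int) :=
  let lastOn := if states[i]?.getD 0 = 1 then some (positions[i]?.getD 0) else st.1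
  match lastOn with
  | some l => (lastOn, st.2.set i (some (positions[i]?.getD 0 - l)))
  | none => (lastOn, st.2)

-- loop body of A's pass 2 (right to left); state = (last_on_pos, min_distances, total)
def aStep2 (states positions : List Int) (st : Option Int × List (Option Int) × Int) (i : Nat) :
    Option Int × List (Option Int) × Int :=
  let lastOn := if states[i]?.getD 0 = 1 then some (positions[i]?.getD 0) else st.1
  let mdv : Option Int :=
    match lastOn with
    | some r =>
      match st.2.1[i]?.getD none with
      | some d => some (min d (r - positions[i]?.getD 0))
      | none => some (r - positions[i]?.getD 0)
    | none => st.2.1[i]?.getD none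
  let md := match lastOn with
    | some _ => st.2.1.set i mdv
    | none => st.2.1
  let total := if states[i]?.getD 0 = 0 then
      match mdv with
      | some d => st.2.2 + d
      | none => st.2.2
    else st.2.2
  (lastOn, md, total)

def calculate_min_cable (states : List Int) (positions : List Int) : Int :=
  let n := states.length
  if n = 0 ∨ (1 : Int) ∉ states then 0
  else
    let p1 := (List.range n).foldl (aStep1 states positions)
      (none, List.replicate n (none : Option Int))
    -- Python's range(n-1, -1, -1) visits n-1,…,0: ported as (List.range n).reverse (exact: same index sequence)
    let p2 := ((List.range n).reverse).foldl (aStep2 states positions) (none, p1.2, 0)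
    p2.2.2

-- ===== PORT B =====
-- loop body of B's single pass; state = (total, last_on, pending)
def bStep (st : Int × Option Int × List Int) (q : Int × Int) : Int × Option Int × List Int :=
  if q.1 = 1 then
    (st.2.2.foldl (fun t x =>
        match st.2.1 with
        | none => t + (q.2 - x)
        | some l => t + min (x - l) (q.2 - x)) st.1,
     some q.2, [])
  else if q.1 = 0 then (st.1, st.2.1, st.2.2 ++ [q.2])
  else st

def calculate_min_cable_alt (states : List Int) (positions : List Int) : Int :=
  let st := (states.zip positions).foldl bStep (0, none, [])
  match st.2.1 with
  | some l => st.2.2.foldl (fun t x => t + (x - l)) st.1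
  | none => st.1

-- ===== PRECONDITION & SPEC =====
-- Pre_ excludes exactly the inputs where A raises IndexError: states contains a 1
-- (so the loops run) while positions is shorter than states.
def Pre_calculate_min_cable (states : List Int) (positions : List Int) : Prop :=
  (1 : Int) ∉ states ∨ states.length ≤ positions.length
instance (states : List Int) (positions : List Int) : Decidable (Pre_calculate_min_cable states positions) := by
  unfold Pre_calculate_min_cable; infer_instance
def pvWitness_calculate_min_cable : List Int × List Int := ([1, 0, 0, 1, 0], [0, 3, 7, 9, 20])

def Spec_calculate_min_cable (states : List Int) (positions : List Int) (out : Int) : Prop := out = calculate_min_cable_alt states positions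
instance (states : List Int) (positions : List Int) (out : Int) : Decidable (Spec_calculate_min_cable states positions out) := by unfold Spec_calculate_min_cable; infer_instance

-- ===== CLAIM (what is proved, stated in full; the proofs are below) =====
def Claim_equal_calculate_min_cable : Prop := ∀ (states : List Int) (positions : List Int), Dom_calculate_min_cable states positions → Pre_calculate_min_cable states positions → Spec_calculate_min_cable states positions (calculate_min_cable states positions)

-- ===== LEMMAS AND PROOFS =====

-- `last ON position so far` accumulator
def updOn (a : Option Int) (q : Int × Int) : Option Int := if q.1 = 1 then some q.2 else a

-- position of the first ON system in the list
def firstOn : List (Int × Int) → Option Int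
  | [] => none
  | q :: rest => if q.1 = 1 then some q.2 else firstOn rest

-- signed distance of an OFF system at position p to its nearest ON neighbour(s)
def dmin : Option Int → Option Int → Int → Int
  | some l, some r, p => min (p - l) (r - p)
  | some l, none, p => p - l
  | none, some r, p => r - p
  | none, none, _ => 0

-- structural specification: total cable for the list, given the last ON position so far
def gTot (acc : Option Int) : List (Int × Int) → Int
  | [] => 0
  | q :: rest => (if q.1 = 0 then dmin acc (firstOn rest) q.2 else 0) + gTot (updOn acc q) rest

-- indexed specification (what A's two passes compute per index)
def cIdx (acc : Option Int) (sp : List (Int × Int)) (i : Nat) : Int :=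
  if (sp[i]?.getD (0,0)).1 = 0 then
    dmin ((sp.take (i+1)).foldl updOn acc) (firstOn (sp.drop i)) ((sp[i]?.getD (0,0)).2)
  else 0

theorem sumFold (h : Int → Int) (xs : List Int) : ∀ t : Int,
    xs.foldl (fun t x => t + h x) t = t + (xs.map h).sum := by
  induction xs with
  | nil => simp
  | cons x xs ih => intro t; simp [List.foldl_cons, ih]; ring

theorem sum_map_zero (xs : List Int) : (xs.map (fun _ => (0:Int))).sum = 0 := by
  induction xs with
  | nil => rfl
  | cons x xs ih => simp [ih]

theorem getD_set_ne {α : Type} (l : List α) (i j : Nat) (v : α) (d : α) (h : i ≠ j) :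
    (l.set i v)[j]?.getD d = l[j]?.getD d := by
  simp [List.getElem?_set_ne h]

theorem getD_set_self {α : Type} (l : List α) (i : Nat) (v : α) (d : α) (h : i < l.length) :
    (l.set i v)[i]?.getD d = v := by
  rw [List.getElem?_set_self h]
  rfl

theorem zip_get? (states positions : List Int) (k : Nat)
    (h1 : k < states.length) (h2 : k < positions.length) :
    (states.zip positions)[k]? = some (states[k]?.getD 0, positions[k]?.getD 0) := by
  simp [List.zip, List.getElem?_zipWith', List.getElem?_eq_getElem, h1, h2]

theorem firstOn_drop (sp : List (Int × Int)) (k : Nat) (h : k < sp.length) :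
    firstOn (sp.drop k) =
      if (sp[k]?.getD (0,0)).1 = 1 then some ((sp[k]?.getD (0,0)).2)
      else firstOn (sp.drop (k+1)) := by
  rw [List.drop_eq_getElem_cons h]
  simp [firstOn, List.getElem?_eq_getElem h]

-- B's whole computation, generalized over the running state
theorem bRun (sp : List (Int × Int)) : ∀ (t : Int) (acc : Option Int) (pend : List Int),
    (match (sp.foldl bStep (t, acc, pend)).2.1 with
     | some l => (sp.foldl bStep (t, acc, pend)).2.2.foldl (fun u x => u + (x - l))
         (sp.foldl bStep (t, acc, pend)).1
     | none => (sp.foldl bStep (t, acc, pend)).1)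
    = t + (pend.map (fun x => dmin acc (firstOn sp) x)).sum + gTot acc sp := by
  induction sp with
  | nil =>
    intro t acc pend
    cases acc with
    | none => simp [gTot, firstOn, dmin, sum_map_zero]
    | some l => simp [gTot, firstOn, dmin, sumFold (fun x => x - l)]
  | cons q rest ih =>
    intro t acc pend
    by_cases h1 : q.1 = 1
    · have hstep : bStep (t, acc, pend) q
          = (t + (pend.map (fun x => dmin acc (some q.2) x)).sum, some q.2, ([] : List Int)) := by
        cases acc with
        | none => simp [bStep, h1, dmin, sumFold (fun x => q.2 - x)]
        | some l => simp [bStep, h1, dmin, sumFold (fun x => min (x - l) (q.2 - x))]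
      rw [List.foldl_cons, hstep, ih]
      simp [gTot, firstOn, updOn, h1, sum_map_zero]
    · by_cases h0 : q.1 = 0
      · have hstep : bStep (t, acc, pend) q = (t, acc, pend ++ [q.2]) := by
          simp [bStep, h1, h0]
        rw [List.foldl_cons, hstep, ih]
        simp [gTot, firstOn, updOn, h1, h0]
        ring
      · have hstep : bStep (t, acc, pend) q = (t, acc, pend) := by
          simp [bStep, h1, h0]
        rw [List.foldl_cons, hstep, ih]
        simp [gTot, firstOn, updOn, h1, h0]

theorem alt_eq_gTot (states positions : List Int) :
    calculate_min_cable_alt states positions = gTot none (states.zip positions) := by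
  have := bRun (states.zip positions) 0 none []
  simpa [calculate_min_cable_alt] using this

theorem gTot_eq_sum : ∀ (sp : List (Int × Int)) (acc : Option Int),
    gTot acc sp = ∑ i ∈ Finset.range sp.length, cIdx acc sp i := by
  intro sp
  induction sp with
  | nil => intro acc; simp [gTot]
  | cons q rest ih =>
    intro acc
    have hshift : ∀ i, cIdx acc (q :: rest) (i+1) = cIdx (updOn acc q) rest i := by
      intro i
      simp [cIdx, List.take_succ_cons, List.drop_succ_cons, List.foldl_cons]
    have hzero : cIdx acc (q :: rest) 0 = if q.1 = 0 then dmin acc (firstOn rest) q.2 else 0 := by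
      by_cases h0 : q.1 = 0
      · have hupd : updOn acc q = acc := by simp [updOn, h0]
        have hfo : firstOn (q :: rest) = firstOn rest := by simp [firstOn, h0]
        simp [cIdx, h0, List.take_succ_cons, hupd, hfo]
      · simp [cIdx, h0]
    rw [List.length_cons, Finset.sum_range_succ']
    simp only [hshift, hzero]
    rw [gTot, ih (updOn acc q)]
    ring

theorem firstOn_none (sp : List (Int × Int)) (h : ∀ q ∈ sp, q.1 ≠ (1:Int)) : firstOn sp = none := by
  induction sp with
  | nil => rfl
  | cons q rest ih =>
    have hq := h q (by simp)
    simp [firstOn, hq, ih (fun r hr => h r (by simp [hr]))]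

theorem gTot_none (sp : List (Int × Int)) (h : ∀ q ∈ sp, q.1 ≠ (1:Int)) : gTot none sp = 0 := by
  induction sp with
  | nil => rfl
  | cons q rest ih =>
    have hq := h q (by simp)
    have hrest : ∀ r ∈ rest, r.1 ≠ (1:Int) := fun r hr => h r (by simp [hr])
    by_cases h0 : q.1 = 0
    · simp [gTot, h0, updOn, hq, firstOn_none rest hrest, dmin, ih hrest]
    · simp [gTot, h0, updOn, hq, ih hrest]

theorem pass1 (states positions : List Int) (hlen : states.length ≤ positions.length) :
    ∀ k, k ≤ states.length →
    ((List.range k).foldl (aStep1 states positions)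
        (none, List.replicate states.length (none : Option Int))).1
      = ((states.zip positions).take k).foldl updOn none ∧
    ((List.range k).foldl (aStep1 states positions)
        (none, List.replicate states.length (none : Option Int))).2.length = states.length ∧
    ∀ i, ((List.range k).foldl (aStep1 states positions)
        (none, List.replicate states.length (none : Option Int))).2[i]?.getD none
      = if i < k then
          (((states.zip positions).take (i+1)).foldl updOn none).map
            (fun l => (((states.zip positions)[i]?.getD (0,0)).2) - l)
        else none := by
  set sp := states.zip positions with hsp
  have hsplen : sp.length = states.length := by
    rw [hsp, List.length_zip]; omega
  intro k
  induction k with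
  | zero =>
    intro _
    refine ⟨by simp, by simp, ?_⟩
    intro i
    simp [List.getElem?_replicate]
    split <;> rfl
  | succ k ih =>
    intro hk1
    have hk : k ≤ states.length := by omega
    have hkn : k < states.length := by omega
    obtain ⟨ih1, ih2, ih3⟩ := ih hk
    have hzipk : sp[k]? = some (states[k]?.getD 0, positions[k]?.getD 0) := by
      rw [hsp]; exact zip_get? states positions k hkn (by omega)
    have hspk : sp[k]?.getD (0,0) = (states[k]?.getD 0, positions[k]?.getD 0) := by
      rw [hzipk]; rfl
    have htake : sp.take (k+1) = sp.take k ++ [(states[k]?.getD 0, positions[k]?.getD 0)] := by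
      rw [List.take_add_one, hzipk]; rfl
    have hfold : (sp.take (k+1)).foldl updOn none
        = (if states[k]?.getD 0 = 1 then some (positions[k]?.getD 0)
           else (sp.take k).foldl updOn none) := by
      rw [htake, List.foldl_append]
      simp [updOn]
    rw [List.range_succ, List.foldl_append, List.foldl_cons, List.foldl_nil]
    set r := (List.range k).foldl (aStep1 states positions)
      (none, List.replicate states.length (none : Option Int)) with hr
    by_cases hs : states[k]?.getD 0 = 1
    · have hstep : aStep1 states positions r k
          = (some (positions[k]?.getD 0),
             r.2.set k (some (positions[k]?.getD 0 - positions[k]?.getD 0))) := by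
        simp [aStep1, hs]
      rw [hstep]
      refine ⟨by rw [hfold]; simp [hs], by simp [ih2], ?_⟩
      intro i
      by_cases hik : i = k
      · subst hik
        have hlt : i < r.2.length := by omega
        rw [getD_set_self _ _ _ _ hlt, if_pos (by omega : i < i + 1), hfold]
        simp [hs, hspk]
      · rw [getD_set_ne _ _ _ _ _ (fun h => hik h.symm), ih3 i]
        by_cases hi : i < k
        · rw [if_pos hi, if_pos (by omega : i < k + 1)]
        · rw [if_neg hi, if_neg (by omega : ¬ i < k + 1)]
    · by_cases hnone : (sp.take k).foldl updOn none = none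
      · have hr1 : r.1 = none := by rw [ih1, hnone]
        have hstep : aStep1 states positions r k = (r.1, r.2) := by
          simp [aStep1, hs, hr1]
        rw [hstep]
        refine ⟨by rw [ih1, hfold]; simp [hs], ih2, ?_⟩
        intro i
        rw [ih3 i]
        by_cases hik : i = k
        · subst hik
          rw [if_neg (by omega : ¬ i < i), if_pos (by omega : i < i + 1), hfold]
          simp [hs, hnone]
        · by_cases hi : i < k
          · rw [if_pos hi, if_pos (by omega : i < k + 1)]
          · rw [if_neg hi, if_neg (by omega : ¬ i < k + 1)]
      · obtain ⟨l, hl⟩ := Option.ne_none_iff_exists'.mp hnone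
        have hr1 : r.1 = some l := by rw [ih1, hl]
        have hstep : aStep1 states positions r k
            = (r.1, r.2.set k (some (positions[k]?.getD 0 - l))) := by
          simp [aStep1, hs, hr1]
        rw [hstep]
        refine ⟨by rw [ih1, hfold]; simp [hs], by simp [ih2], ?_⟩
        intro i
        by_cases hik : i = k
        · subst hik
          have hlt : i < r.2.length := by omega
          rw [getD_set_self _ _ _ _ hlt, if_pos (by omega : i < i + 1), hfold]
          simp [hs, hl, hspk]
        · rw [getD_set_ne _ _ _ _ _ (fun h => hik h.symm), ih3 i]
          by_cases hi : i < k
          · rw [if_pos hi, if_pos (by omega : i < k + 1)]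
          · rw [if_neg hi, if_neg (by omega : ¬ i < k + 1)]

theorem pass2 (states positions : List Int) (hlen : states.length ≤ positions.length) :
    ∀ k, k ≤ states.length → ∀ (md : List (Option Int)) (T : Int),
    md.length = states.length →
    (∀ i, i < k → md[i]?.getD none
        = (((states.zip positions).take (i+1)).foldl updOn none).map
            (fun l => (((states.zip positions)[i]?.getD (0,0)).2) - l)) →
    ((((List.range k).reverse).foldl (aStep2 states positions)
        (firstOn ((states.zip positions).drop k), md, T)).2.2)
      = T + ∑ i ∈ Finset.range k, cIdx none (states.zip positions) i := by
  set sp := states.zip positions with hsp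
  have hsplen : sp.length = states.length := by
    rw [hsp, List.length_zip]; omega
  intro k
  induction k with
  | zero => intro _ md T _ _; simp
  | succ k ih =>
    intro hk1 md T hmdlen hmd
    have hkn : k < states.length := by omega
    have hks : k < sp.length := by omega
    have hzipk : sp[k]? = some (states[k]?.getD 0, positions[k]?.getD 0) := by
      rw [hsp]; exact zip_get? states positions k hkn (by omega)
    have hspk : sp[k]?.getD (0,0) = (states[k]?.getD 0, positions[k]?.getD 0) := by
      rw [hzipk]; rfl
    have hrev : (List.range (k+1)).reverse = k :: (List.range k).reverse := by
      rw [List.range_succ, List.reverse_append]; simp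
    rw [hrev, List.foldl_cons]
    have hfo := firstOn_drop sp k hks
    simp only [hspk] at hfo
    have hmdk := hmd k (by omega)
    simp only [hspk] at hmdk
    have hck : cIdx none sp k
        = if states[k]?.getD 0 = 0 then
            dmin ((sp.take (k+1)).foldl updOn none) (firstOn (sp.drop k)) (positions[k]?.getD 0)
          else 0 := by
      simp [cIdx, hspk]
    have hpres : ∀ (v : Option Int) (i : Nat), i < k →
        (md.set k v)[i]?.getD none
          = ((sp.take (i+1)).foldl updOn none).map (fun l => ((sp[i]?.getD (0,0)).2) - l) := by
      intro v i hi
      rw [getD_set_ne _ _ _ _ _ (by omega : k ≠ i)]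
      exact hmd i (by omega)
    obtain ⟨md', hstep, hlen', hmd'⟩ :
        ∃ md', aStep2 states positions (firstOn (sp.drop (k+1)), md, T) k
            = (firstOn (sp.drop k), md', T + cIdx none sp k) ∧
          md'.length = states.length ∧
          (∀ i, i < k → md'[i]?.getD none
            = ((sp.take (i+1)).foldl updOn none).map (fun l => ((sp[i]?.getD (0,0)).2) - l)) := by
      by_cases hs : states[k]?.getD 0 = 1
      · have hR1 : firstOn (sp.drop k) = some (positions[k]?.getD 0) := by
          rw [hfo]; simp [hs]
        have hck' : cIdx none sp k = 0 := by rw [hck]; simp [hs]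
        cases hLv : (sp.take (k+1)).foldl updOn none with
        | some l =>
          rw [hLv] at hmdk
          refine ⟨md.set k (some (min (positions[k]?.getD 0 - l)
            (positions[k]?.getD 0 - positions[k]?.getD 0))), ?_, by simp [hmdlen], hpres _⟩
          simp [aStep2, hs, hmdk, hR1, hck']
        | none =>
          rw [hLv] at hmdk
          refine ⟨md.set k (some (positions[k]?.getD 0 - positions[k]?.getD 0)), ?_,
            by simp [hmdlen], hpres _⟩
          simp [aStep2, hs, hmdk, hR1, hck']
      · have hR2 : firstOn (sp.drop k) = firstOn (sp.drop (k+1)) := by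
          rw [hfo]; simp [hs]
        cases hA : firstOn (sp.drop (k+1)) with
        | some r =>
          cases hLv : (sp.take (k+1)).foldl updOn none with
          | some l =>
            rw [hLv] at hmdk
            refine ⟨md.set k (some (min (positions[k]?.getD 0 - l) (r - positions[k]?.getD 0))),
              ?_, by simp [hmdlen], hpres _⟩
            rw [hck, hR2, hA, hLv]
            by_cases h0 : states[k]?.getD 0 = 0
            · simp [aStep2, hs, h0, hmdk, hA, dmin]
            · simp [aStep2, hs, h0, hmdk, hA, dmin]
          | none =>
            rw [hLv] at hmdk
            refine ⟨md.set k (some (r - positions[k]?.getD 0)), ?_, by simp [hmdlen], hpres _⟩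
            rw [hck, hR2, hA, hLv]
            by_cases h0 : states[k]?.getD 0 = 0
            · simp [aStep2, hs, h0, hmdk, hA, dmin]
            · simp [aStep2, hs, h0, hmdk, hA, dmin]
        | none =>
          refine ⟨md, ?_, hmdlen, fun i hi => hmd i (by omega)⟩
          cases hLv : (sp.take (k+1)).foldl updOn none with
          | some l =>
            rw [hLv] at hmdk
            rw [hck, hR2, hA, hLv]
            by_cases h0 : states[k]?.getD 0 = 0
            · simp [aStep2, hs, h0, hmdk, hA, hR2, dmin]
            · simp [aStep2, hs, h0, hmdk, hA, hR2, dmin]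
          | none =>
            rw [hLv] at hmdk
            rw [hck, hR2, hA, hLv]
            by_cases h0 : states[k]?.getD 0 = 0
            · simp [aStep2, hs, h0, hmdk, hA, hR2, dmin]
            · simp [aStep2, hs, h0, hmdk, hA, hR2, dmin]
    rw [hstep, ih (by omega) md' (T + cIdx none sp k) hlen' hmd', Finset.sum_range_succ]
    ring

-- ===== VERDICT (by name: the statement is the Claim_ definition above) =====
theorem calculate_min_cable_spec : Claim_equal_calculate_min_cable := by
  intro states positions _ hpre
  unfold Spec_calculate_min_cable
  rw [alt_eq_gTot]
  by_cases h1 : (1 : Int) ∈ states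
  · have hlen : states.length ≤ positions.length := by
      rcases hpre with h | h
      · exact absurd h1 h
      · exact h
    have hne : states.length ≠ 0 := by
      cases states with
      | nil => exact absurd h1 (by simp)
      | cons a l => simp
    have hsplen : (states.zip positions).length = states.length := by
      rw [List.length_zip]; omega
    obtain ⟨hp1a, hp1b, hp1c⟩ := pass1 states positions hlen states.length le_rfl
    have hdrop : firstOn ((states.zip positions).drop states.length) = none := by
      rw [List.drop_eq_nil_iff.mpr (by omega)]
      rfl
    have hp2 := pass2 states positions hlen states.length le_rfl
      ((List.range states.length).foldl (aStep1 states positions)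
        (none, List.replicate states.length (none : Option Int))).2 0 hp1b
      (fun i hi => by rw [hp1c i, if_pos hi])
    rw [hdrop] at hp2
    simp only [calculate_min_cable,
      if_neg (by push_neg; exact ⟨hne, h1⟩ : ¬ (states.length = 0 ∨ (1:Int) ∉ states))]
    rw [hp2, gTot_eq_sum, hsplen]
    ring
  · simp only [calculate_min_cable, if_pos (Or.inr h1)]
    refine (gTot_none _ ?_).symm
    intro q hq h1q
    obtain ⟨a, b⟩ := q
    exact h1 (h1q ▸ (List.of_mem_zip hq).1)
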